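-- pv_equiv track=rewrite | github.com/RotemWeissman96/Python---nanogram-backtracking | nonogram.py | _compare_items_in_lst
-- ===== SOURCE A (Python) =====
-- def _compare_items_in_lst(lst):
--     """
--    The function gets a list of 0,1,-1 and compares all the items in list,
--    in order to determine what is the agreeable value to return. for example
--    if all the items in list are the same it will return their value. If
--    there is a disagreement (list that contains 0's and 1's) it will return
--    -1.
--    :param lst: (list) list of 0,1,-1
--    :return: (int) 0/1/-1 the agreeable value, depends on the item in list
--    """
--     if len(lst) == 1:
--         return lst[0]
--
--     num_equals = 0
--     indicator = -1
--     for item in lst: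
--         if item != -1:
--             indicator = item
--             break
--     if indicator == -1:
--         return -1
--
--     if indicator == 0:
--         if 1 in lst:
--             return -1
--         else:
--             return 0
--
--     else:
--         if 0 in lst:
--             return -1
--         else:
--             return 1
-- ===== SOURCE B (Python) =====
-- def _compare_items_in_lst(lst):
--     """Single pass: record whether the first non -1 item is zero, and
--     whether 0 / 1 occur anywhere, then combine; no rescans of the list."""
--     if len(lst) == 1:
--         return lst[0]
--     first_is_zero = None
--     has0 = False
--     has1 = False
--     for x in lst:
--         if first_is_zero is None and x != -1:
--             first_is_zero = (x == 0)
--         if x == 0: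
--             has0 = True
--         if x == 1:
--             has1 = True
--     if first_is_zero is None:
--         return -1
--     if first_is_zero:
--         return -1 if has1 else 0
--     return -1 if has0 else 1
-- ===== Notes on version B (the rewrite author's own statement) =====
-- stated objective: alternative
-- what changed: Replaces A's search-for-first-indicator loop followed by a separate membership rescan ('1 in lst' / '0 in lst') with one single pass that simultaneously records whether the first non -1 item is zero and whether 0 and 1 occur, then combines the three flags.
import Mathlib
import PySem

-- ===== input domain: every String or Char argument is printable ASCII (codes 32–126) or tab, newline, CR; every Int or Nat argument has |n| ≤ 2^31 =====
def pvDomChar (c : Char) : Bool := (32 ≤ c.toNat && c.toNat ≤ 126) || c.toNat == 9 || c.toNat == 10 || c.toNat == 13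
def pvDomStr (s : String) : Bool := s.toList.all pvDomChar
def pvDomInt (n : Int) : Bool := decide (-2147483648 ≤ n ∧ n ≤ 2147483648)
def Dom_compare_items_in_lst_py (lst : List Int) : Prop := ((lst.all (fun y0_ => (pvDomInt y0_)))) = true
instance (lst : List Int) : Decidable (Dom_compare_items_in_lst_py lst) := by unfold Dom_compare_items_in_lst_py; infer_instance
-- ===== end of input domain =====

-- B replaces A's find-first-indicator loop + membership rescan with one single-pass
-- fold over three flags (alternative decomposition, same O(n) cost).


-- ===== PORT A =====
-- A's 'for item in lst: if item != -1: indicator = item; break' loop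
def pvFindIndicator : List Int → Int
  | [] => -1
  | x :: xs => if x ≠ -1 then x else pvFindIndicator xs

def compare_items_in_lst_py (lst : List Int) : Int :=
  if lst.length = 1 then (PySem.List.pyGet? lst 0).getD (-1)
  else
    let indicator := pvFindIndicator lst
    if indicator = -1 then -1
    else if indicator = 0 then
      (if lst.contains 1 then -1 else 0)
    else
      (if lst.contains 0 then -1 else 1)

-- ===== PORT B =====
-- B's single pass: (first_is_zero?, has0, has1)
def pvScanStep (st : Option Bool × Bool × Bool) (x : Int) : Option Bool × Bool × Bool :=
  let fz := if st.1.isNone ∧ x ≠ -1 then some (x == 0) else st.1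
  (fz, st.2.1 || (x == 0), st.2.2 || (x == 1))

def compare_items_in_lst_py_alt (lst : List Int) : Int :=
  if lst.length = 1 then (PySem.List.pyGet? lst 0).getD (-1)
  else
    let s := lst.foldl pvScanStep (none, false, false)
    match s.1 with
    | none => -1
    | some true => if s.2.2 then -1 else 0
    | some false => if s.2.1 then -1 else 1

-- ===== PRECONDITION & SPEC =====
def Spec_compare_items_in_lst_py (lst : List Int) (out : Int) : Prop := out = compare_items_in_lst_py_alt lst
instance (lst : List Int) (out : Int) : Decidable (Spec_compare_items_in_lst_py lst out) := by unfold Spec_compare_items_in_lst_py; infer_instance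

-- ===== CLAIM (what is proved, stated in full; the proofs are below) =====
def Claim_equal_compare_items_in_lst_py : Prop := ∀ (lst : List Int), Dom_compare_items_in_lst_py lst → Spec_compare_items_in_lst_py lst (compare_items_in_lst_py lst)

-- ===== LEMMAS AND PROOFS =====

theorem pvScan_fst (lst : List Int) (b : Bool) (h0 h1 : Bool) :
    (lst.foldl pvScanStep (some b, h0, h1)).1 = some b := by
  induction lst generalizing h0 h1 with
  | nil => rfl
  | cons x xs ih => simp [List.foldl, pvScanStep, ih]

theorem pvScan_has0 (lst : List Int) (fz : Option Bool) (h0 h1 : Bool) :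
    (lst.foldl pvScanStep (fz, h0, h1)).2.1 = (h0 || lst.contains 0) := by
  induction lst generalizing fz h0 h1 with
  | nil => simp
  | cons x xs ih =>
      simp only [List.foldl, pvScanStep, ih, List.contains_cons]
      by_cases hx : x = 0
      · simp [hx]
      · have e1 : (x == (0:Int)) = false := by simp [hx]
        have e2 : ((0:Int) == x) = false := by simp [Ne.symm hx]
        simp [e1, e2]

theorem pvScan_has1 (lst : List Int) (fz : Option Bool) (h0 h1 : Bool) :
    (lst.foldl pvScanStep (fz, h0, h1)).2.2 = (h1 || lst.contains 1) := by
  induction lst generalizing fz h0 h1 with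
  | nil => simp
  | cons x xs ih =>
      simp only [List.foldl, pvScanStep, ih, List.contains_cons]
      by_cases hx : x = 1
      · simp [hx]
      · have e1 : (x == (1:Int)) = false := by simp [hx]
        have e2 : ((1:Int) == x) = false := by simp [Ne.symm hx]
        simp [e1, e2]

-- the fold's first component is the first element ≠ -1, tested for zero
theorem pvScan_fst_none (lst : List Int) (h0 h1 : Bool) :
    (lst.foldl pvScanStep (none, h0, h1)).1 =
      (lst.find? (fun x => x != -1)).map (fun v => v == 0) := by
  induction lst generalizing h0 h1 with
  | nil => rfl
  | cons x xs ih =>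
      by_cases hx : x = -1
      · simp [List.foldl, pvScanStep, hx, List.find?, ih]
      · have hb : (x != -1) = true := by simp [hx]
        simp [List.foldl, pvScanStep, hx, List.find?, hb, pvScan_fst]

-- A's indicator is the first element ≠ -1 (default -1)
theorem pvFind_eq (lst : List Int) :
    pvFindIndicator lst = ((lst.find? (fun x => x != -1)).getD (-1)) := by
  induction lst with
  | nil => rfl
  | cons x xs ih =>
      by_cases hx : x = -1
      · simp [pvFindIndicator, hx, List.find?, ih]
      · have hb : (x != -1) = true := by simp [hx]
        simp [pvFindIndicator, hx, List.find?, hb]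

theorem pv_main (lst : List Int) :
    compare_items_in_lst_py lst = compare_items_in_lst_py_alt lst := by
  unfold compare_items_in_lst_py compare_items_in_lst_py_alt
  by_cases hl : lst.length = 1
  · simp [hl]
  · simp only [hl, if_false, pvScan_fst_none, pvScan_has0, pvScan_has1, Bool.false_or,
      pvFind_eq]
    cases hF : lst.find? (fun x => x != -1) with
    | none => simp
    | some v =>
        have hv : v ≠ -1 := by
          have := List.find?_some hF
          simpa using this
        by_cases hv0 : v = 0
        · simp [hv0]
        · have hb : (v == 0) = false := by simp [hv0]
          simp [hv, hb, hv0]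

-- ===== VERDICT (by name: the statement is the Claim_ definition above) =====
theorem compare_items_in_lst_py_spec : Claim_equal_compare_items_in_lst_py := by
  intro lst _
  unfold Spec_compare_items_in_lst_py
  exact pv_main lst
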